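-- pv_equiv track=rewrite | github.com/Bensie22/Clan-Auswertung | Master_Auswertung_GitHub.py | get_deck_archetype
-- ===== SOURCE A (Python) =====
-- def get_deck_archetype(cards: list) -> str:
--     card_names = [c.get("name", "") for c in cards]
--     if any(n in card_names for n in ["Golem", "Lava Hound", "Giant", "Goblin Giant", "Electro Giant", "Elixir Golem"]):
--         return "🛡️ Schwerer Angriff (Beatdown)"
--     if any(n in card_names for n in ["X-Bow", "Mortar"]):
--         return "🏹 Belagerung (Siege)"
--     if any(n in card_names for n in ["Goblin Barrel", "Skeleton Barrel", "Miner", "Graveyard", "Wall Breakers", "Goblin Drill"]):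
--         return "🗡️ Nadelstiche (Bait/Control)"
--     if any(n in card_names for n in ["Hog Rider", "Royal Hogs", "Battle Ram", "Ram Rider", "Balloon"]):
--         return "⚡ Schneller Angriff (Rush/Spam)"
--     return "⚔️ Hybrid / Allrounder"
-- ===== SOURCE B (Python) =====
-- RANK = {
--     "Golem": 0, "Lava Hound": 0, "Giant": 0, "Goblin Giant": 0,
--     "Electro Giant": 0, "Elixir Golem": 0,
--     "X-Bow": 1, "Mortar": 1,
--     "Goblin Barrel": 2, "Skeleton Barrel": 2, "Miner": 2, "Graveyard": 2,
--     "Wall Breakers": 2, "Goblin Drill": 2,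
--     "Hog Rider": 3, "Royal Hogs": 3, "Battle Ram": 3, "Ram Rider": 3,
--     "Balloon": 3,
-- }
--
-- ARCH = {
--     0: "🛡️ Schwerer Angriff (Beatdown)",
--     1: "🏹 Belagerung (Siege)",
--     2: "🗡️ Nadelstiche (Bait/Control)",
--     3: "⚡ Schneller Angriff (Rush/Spam)",
-- }
--
-- def get_deck_archetype(cards: list) -> str:
--     best = 4
--     for c in cards:
--         best = min(best, RANK.get(c.get("name", ""), 4))
--     return ARCH.get(best, "⚔️ Hybrid / Allrounder")
-- ===== Notes on version B (the rewrite author's own statement) =====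
-- stated objective: alternative
-- what changed: Replaced the four priority-ordered group membership scans over the deck's name list with one card-name-to-priority-rank table, a single pass over the cards keeping the minimum rank, and a rank-to-archetype lookup at the end.
import Mathlib
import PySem

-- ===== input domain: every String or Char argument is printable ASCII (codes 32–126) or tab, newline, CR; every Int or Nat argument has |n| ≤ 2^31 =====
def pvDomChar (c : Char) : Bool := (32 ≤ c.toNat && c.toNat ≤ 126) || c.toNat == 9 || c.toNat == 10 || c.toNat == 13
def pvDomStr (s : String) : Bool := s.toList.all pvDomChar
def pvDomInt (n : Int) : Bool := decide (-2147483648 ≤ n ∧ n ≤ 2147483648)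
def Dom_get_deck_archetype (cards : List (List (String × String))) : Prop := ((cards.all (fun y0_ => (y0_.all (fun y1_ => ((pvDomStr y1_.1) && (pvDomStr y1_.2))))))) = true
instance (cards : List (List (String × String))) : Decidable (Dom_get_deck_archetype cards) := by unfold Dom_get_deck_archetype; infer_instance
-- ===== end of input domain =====

-- B changes the algorithm only: one card→priority-rank table, a single min-rank pass
-- over the cards, and a final rank→archetype lookup, instead of A's four sequential
-- group membership scans. Same return value everywhere.

-- ===== PORT A =====
def get_deck_archetype (cards : List (List (String × String))) : String :=
  let card_names := cards.map (fun c => (PySem.Dict.ofList c).getD "name" "")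
  if ["Golem", "Lava Hound", "Giant", "Goblin Giant", "Electro Giant", "Elixir Golem"].any
      (fun n => card_names.contains n) then "🛡️ Schwerer Angriff (Beatdown)"
  else if ["X-Bow", "Mortar"].any (fun n => card_names.contains n) then "🏹 Belagerung (Siege)"
  else if ["Goblin Barrel", "Skeleton Barrel", "Miner", "Graveyard", "Wall Breakers", "Goblin Drill"].any
      (fun n => card_names.contains n) then "🗡️ Nadelstiche (Bait/Control)"
  else if ["Hog Rider", "Royal Hogs", "Battle Ram", "Ram Rider", "Balloon"].any
      (fun n => card_names.contains n) then "⚡ Schneller Angriff (Rush/Spam)"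
  else "⚔️ Hybrid / Allrounder"

-- ===== PORT B =====
def pvRankTable : PySem.Dict String Int := PySem.Dict.mk
  [("Golem", 0), ("Lava Hound", 0), ("Giant", 0), ("Goblin Giant", 0),
   ("Electro Giant", 0), ("Elixir Golem", 0),
   ("X-Bow", 1), ("Mortar", 1),
   ("Goblin Barrel", 2), ("Skeleton Barrel", 2), ("Miner", 2), ("Graveyard", 2),
   ("Wall Breakers", 2), ("Goblin Drill", 2),
   ("Hog Rider", 3), ("Royal Hogs", 3), ("Battle Ram", 3), ("Ram Rider", 3),
   ("Balloon", 3)]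

def pvArchTable : PySem.Dict Int String := PySem.Dict.mk
  [(0, "🛡️ Schwerer Angriff (Beatdown)"),
   (1, "🏹 Belagerung (Siege)"),
   (2, "🗡️ Nadelstiche (Bait/Control)"),
   (3, "⚡ Schneller Angriff (Rush/Spam)")]

def get_deck_archetype_alt (cards : List (List (String × String))) : String :=
  let best := cards.foldl
    (fun best c => min best (pvRankTable.getD ((PySem.Dict.ofList c).getD "name" "") 4)) 4
  pvArchTable.getD best "⚔️ Hybrid / Allrounder"

-- ===== PRECONDITION & SPEC =====
def Spec_get_deck_archetype (cards : List (List (String × String))) (out : String) : Prop := out = get_deck_archetype_alt cards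
instance (cards : List (List (String × String))) (out : String) : Decidable (Spec_get_deck_archetype cards out) := by unfold Spec_get_deck_archetype; infer_instance

-- ===== CLAIM (what is proved, stated in full; the proofs are below) =====
def Claim_equal_get_deck_archetype : Prop := ∀ (cards : List (List (String × String))), Dom_get_deck_archetype cards → Spec_get_deck_archetype cards (get_deck_archetype cards)

-- ===== LEMMAS AND PROOFS =====

-- rank of a name, as B looks it up
def pvRank (s : String) : Int := pvRankTable.getD s 4

def pvG0 : List String := ["Golem", "Lava Hound", "Giant", "Goblin Giant", "Electro Giant", "Elixir Golem"]
def pvG1 : List String := ["X-Bow", "Mortar"]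
def pvG2 : List String := ["Goblin Barrel", "Skeleton Barrel", "Miner", "Graveyard", "Wall Breakers", "Goblin Drill"]
def pvG3 : List String := ["Hog Rider", "Royal Hogs", "Battle Ram", "Ram Rider", "Balloon"]

lemma pvRank_mem0 (s : String) (h : s ∈ pvG0) : pvRank s = 0 := by
  simp only [pvG0, List.mem_cons, List.not_mem_nil, or_false] at h
  rcases h with rfl|rfl|rfl|rfl|rfl|rfl <;> decide

lemma pvRank_mem1 (s : String) (h : s ∈ pvG1) : pvRank s = 1 := by
  simp only [pvG1, List.mem_cons, List.not_mem_nil, or_false] at h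
  rcases h with rfl|rfl <;> decide

lemma pvRank_mem2 (s : String) (h : s ∈ pvG2) : pvRank s = 2 := by
  simp only [pvG2, List.mem_cons, List.not_mem_nil, or_false] at h
  rcases h with rfl|rfl|rfl|rfl|rfl|rfl <;> decide

lemma pvRank_mem3 (s : String) (h : s ∈ pvG3) : pvRank s = 3 := by
  simp only [pvG3, List.mem_cons, List.not_mem_nil, or_false] at h
  rcases h with rfl|rfl|rfl|rfl|rfl <;> decide

lemma pvRank_of_not_mem (s : String) (h0 : s ∉ pvG0) (h1 : s ∉ pvG1) (h2 : s ∉ pvG2) (h3 : s ∉ pvG3) :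
    pvRank s = 4 := by
  simp only [pvG0, pvG1, pvG2, pvG3, List.mem_cons, List.not_mem_nil, or_false, not_or] at h0 h1 h2 h3
  obtain ⟨a1,a2,a3,a4,a5,a6⟩ := h0; obtain ⟨b1,b2⟩ := h1
  obtain ⟨c1,c2,c3,c4,c5,c6⟩ := h2; obtain ⟨d1,d2,d3,d4,d5⟩ := h3
  simp [pvRank, pvRankTable, PySem.Dict.getD_eq_get?_getD, PySem.Dict.get?_mk_cons,
    Ne.symm a1, Ne.symm a2, Ne.symm a3, Ne.symm a4, Ne.symm a5, Ne.symm a6,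
    Ne.symm b1, Ne.symm b2, Ne.symm c1, Ne.symm c2, Ne.symm c3, Ne.symm c4, Ne.symm c5, Ne.symm c6,
    Ne.symm d1, Ne.symm d2, Ne.symm d3, Ne.symm d4, Ne.symm d5]
  rfl

lemma pvRank_cases (s : String) : pvRank s =
    (if s ∈ pvG0 then 0 else if s ∈ pvG1 then 1 else if s ∈ pvG2 then 2
     else if s ∈ pvG3 then 3 else 4) := by
  split_ifs with h0 h1 h2 h3
  · exact pvRank_mem0 s h0
  · exact pvRank_mem1 s h1
  · exact pvRank_mem2 s h2
  · exact pvRank_mem3 s h3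
  · exact pvRank_of_not_mem s h0 h1 h2 h3

lemma pvRank_le0 (s : String) : pvRank s ≤ 0 ↔ s ∈ pvG0 := by
  rw [pvRank_cases]; split_ifs <;> simp_all

lemma pvRank_le1 (s : String) : pvRank s ≤ 1 ↔ s ∈ pvG0 ∨ s ∈ pvG1 := by
  rw [pvRank_cases]; split_ifs <;> simp_all

lemma pvRank_le2 (s : String) : pvRank s ≤ 2 ↔ s ∈ pvG0 ∨ s ∈ pvG1 ∨ s ∈ pvG2 := by
  rw [pvRank_cases]; split_ifs <;> simp_all

lemma pvRank_le3 (s : String) : pvRank s ≤ 3 ↔ s ∈ pvG0 ∨ s ∈ pvG1 ∨ s ∈ pvG2 ∨ s ∈ pvG3 := by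
  rw [pvRank_cases]; split_ifs <;> simp_all

lemma foldl_min_le_iff (f : String → Int) (l : List String) (init k : Int) :
    l.foldl (fun b n => min b (f n)) init ≤ k ↔ init ≤ k ∨ ∃ n ∈ l, f n ≤ k := by
  induction l generalizing init with
  | nil => simp
  | cons a l ih => simp [List.foldl_cons, ih]; tauto

lemma any_contains_iff (G names : List String) :
    (G.any (fun n => names.contains n) = true) ↔ ∃ n ∈ names, n ∈ G := by
  simp only [List.any_eq_true, List.contains_eq_mem, decide_eq_true_eq]
  tauto

lemma pv_main (names : List String) :
    (if pvG0.any (fun n => names.contains n) then "🛡️ Schwerer Angriff (Beatdown)"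
     else if pvG1.any (fun n => names.contains n) then "🏹 Belagerung (Siege)"
     else if pvG2.any (fun n => names.contains n) then "🗡️ Nadelstiche (Bait/Control)"
     else if pvG3.any (fun n => names.contains n) then "⚡ Schneller Angriff (Rush/Spam)"
     else "⚔️ Hybrid / Allrounder")
    = pvArchTable.getD (names.foldl (fun b n => min b (pvRank n)) 4) "⚔️ Hybrid / Allrounder" := by
  set v := names.foldl (fun b n => min b (pvRank n)) 4 with hv
  have hle : ∀ k : Int, v ≤ k ↔ (4 : Int) ≤ k ∨ ∃ n ∈ names, pvRank n ≤ k :=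
    fun k => foldl_min_le_iff pvRank names 4 k
  have hrange : (0 : Int) ≤ v := by
    by_cases h : (0 : Int) ≤ v
    · exact h
    · exfalso
      rw [not_le] at h
      rcases (hle (-1)).mp (show v ≤ -1 by omega) with h4 | ⟨n, _, hn⟩
      · omega
      · rw [pvRank_cases] at hn; split_ifs at hn <;> omega
  by_cases h0 : ∃ n ∈ names, n ∈ pvG0
  · rw [if_pos ((any_contains_iff _ _).mpr h0)]
    have hv0 : v = 0 := by
      have : v ≤ 0 := (hle 0).mpr (Or.inr (by
        obtain ⟨n, hn, hg⟩ := h0; exact ⟨n, hn, (pvRank_le0 n).mpr hg⟩))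
      omega
    rw [hv0]; decide
  · rw [if_neg (fun h => h0 ((any_contains_iff _ _).mp h))]
    have hn0 : ¬ v ≤ 0 := fun hc => by
      rcases (hle 0).mp hc with h | ⟨n, hn, hr⟩
      · omega
      · exact h0 ⟨n, hn, (pvRank_le0 n).mp hr⟩
    by_cases h1 : ∃ n ∈ names, n ∈ pvG1
    · rw [if_pos ((any_contains_iff _ _).mpr h1)]
      have hv1 : v = 1 := by
        have : v ≤ 1 := (hle 1).mpr (Or.inr (by
          obtain ⟨n, hn, hg⟩ := h1; exact ⟨n, hn, (pvRank_le1 n).mpr (Or.inr hg)⟩))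
        omega
      rw [hv1]; decide
    · rw [if_neg (fun h => h1 ((any_contains_iff _ _).mp h))]
      have hn1 : ¬ v ≤ 1 := fun hc => by
        rcases (hle 1).mp hc with h | ⟨n, hn, hr⟩
        · omega
        · rcases (pvRank_le1 n).mp hr with h | h
          · exact h0 ⟨n, hn, h⟩
          · exact h1 ⟨n, hn, h⟩
      by_cases h2 : ∃ n ∈ names, n ∈ pvG2
      · rw [if_pos ((any_contains_iff _ _).mpr h2)]
        have hv2 : v = 2 := by
          have : v ≤ 2 := (hle 2).mpr (Or.inr (by
            obtain ⟨n, hn, hg⟩ := h2; exact ⟨n, hn, (pvRank_le2 n).mpr (Or.inr (Or.inr hg))⟩))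
          omega
        rw [hv2]; decide
      · rw [if_neg (fun h => h2 ((any_contains_iff _ _).mp h))]
        have hn2 : ¬ v ≤ 2 := fun hc => by
          rcases (hle 2).mp hc with h | ⟨n, hn, hr⟩
          · omega
          · rcases (pvRank_le2 n).mp hr with h | h | h
            · exact h0 ⟨n, hn, h⟩
            · exact h1 ⟨n, hn, h⟩
            · exact h2 ⟨n, hn, h⟩
        by_cases h3 : ∃ n ∈ names, n ∈ pvG3
        · rw [if_pos ((any_contains_iff _ _).mpr h3)]
          have hv3 : v = 3 := by
            have : v ≤ 3 := (hle 3).mpr (Or.inr (by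
              obtain ⟨n, hn, hg⟩ := h3
              exact ⟨n, hn, (pvRank_le3 n).mpr (Or.inr (Or.inr (Or.inr hg)))⟩))
            omega
          rw [hv3]; decide
        · rw [if_neg (fun h => h3 ((any_contains_iff _ _).mp h))]
          have hn3 : ¬ v ≤ 3 := fun hc => by
            rcases (hle 3).mp hc with h | ⟨n, hn, hr⟩
            · omega
            · rcases (pvRank_le3 n).mp hr with h | h | h | h
              · exact h0 ⟨n, hn, h⟩
              · exact h1 ⟨n, hn, h⟩
              · exact h2 ⟨n, hn, h⟩
              · exact h3 ⟨n, hn, h⟩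
          have hv4 : v = 4 := by
            have : v ≤ 4 := (hle 4).mpr (Or.inl le_rfl)
            omega
          rw [hv4]; decide

-- ===== VERDICT (by name: the statement is the Claim_ definition above) =====
theorem get_deck_archetype_spec : Claim_equal_get_deck_archetype := by
  intro cards _
  unfold Spec_get_deck_archetype
  have hA : get_deck_archetype cards =
      (if pvG0.any (fun n => (cards.map (fun c => (PySem.Dict.ofList c).getD "name" "")).contains n)
        then "🛡️ Schwerer Angriff (Beatdown)"
       else if pvG1.any (fun n => (cards.map (fun c => (PySem.Dict.ofList c).getD "name" "")).contains n)
        then "🏹 Belagerung (Siege)"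
       else if pvG2.any (fun n => (cards.map (fun c => (PySem.Dict.ofList c).getD "name" "")).contains n)
        then "🗡️ Nadelstiche (Bait/Control)"
       else if pvG3.any (fun n => (cards.map (fun c => (PySem.Dict.ofList c).getD "name" "")).contains n)
        then "⚡ Schneller Angriff (Rush/Spam)"
       else "⚔️ Hybrid / Allrounder") := rfl
  have hB : get_deck_archetype_alt cards =
      pvArchTable.getD
        (cards.foldl (fun best c =>
          min best (pvRankTable.getD ((PySem.Dict.ofList c).getD "name" "") 4)) 4)
        "⚔️ Hybrid / Allrounder" := rfl
  rw [hA, hB]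
  have hmap : List.foldl (fun best c =>
        min best (pvRankTable.getD ((PySem.Dict.ofList c).getD "name" "") 4)) 4 cards
      = List.foldl (fun b n => min b (pvRank n)) 4
        (cards.map (fun c => (PySem.Dict.ofList c).getD "name" "")) := by
    rw [List.foldl_map]; rfl
  rw [hmap]
  exact pv_main (cards.map (fun c => (PySem.Dict.ofList c).getD "name" ""))
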